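-- pv_equiv track=rewrite | github.com/14sudarsan/Problem-Solving---DSA---100 | array/string/magneticletters.py | constructstring
-- ===== SOURCE A (Python) =====
-- def constructstring(s1,s2,r):
--
--     if len(s1)+len(s2) != len(r):
--
--         return False
--
--
--     count = {}
--
--     for char in r:
--
--         if char in count:
--
--             count[char] = count[char]+1
--
--         else:
--             count[char] = 1
--
--
--     combined = s1+s2
--
--     for char in combined:
--
--         if char not in count or count[char]== 0:
--
--             return "No"
--
--         else:
--
--             count[char] = count[char]-1
--
--     for value in count.values():
--
--         if value!= 0:
--
--             return False
--
--     return True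
-- ===== SOURCE B (Python) =====
-- def constructstring(s1, s2, r):
--     if len(s1) + len(s2) != len(r):
--         return False
--     return sorted(s1 + s2) == sorted(r)
-- ===== Notes on version B (the rewrite author's own statement) =====
-- stated objective: alternative
-- what changed: Replaced the count-dict build, decrement-with-early-exit loop and final zero-check loop by a single sort-and-compare (sorted(s1+s2) == sorted(r)) behind the same length guard.
-- outside the precondition, e.g. on constructstring('a', 'b', 'cc'): A returns 'No', B returns False
import Mathlib
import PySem

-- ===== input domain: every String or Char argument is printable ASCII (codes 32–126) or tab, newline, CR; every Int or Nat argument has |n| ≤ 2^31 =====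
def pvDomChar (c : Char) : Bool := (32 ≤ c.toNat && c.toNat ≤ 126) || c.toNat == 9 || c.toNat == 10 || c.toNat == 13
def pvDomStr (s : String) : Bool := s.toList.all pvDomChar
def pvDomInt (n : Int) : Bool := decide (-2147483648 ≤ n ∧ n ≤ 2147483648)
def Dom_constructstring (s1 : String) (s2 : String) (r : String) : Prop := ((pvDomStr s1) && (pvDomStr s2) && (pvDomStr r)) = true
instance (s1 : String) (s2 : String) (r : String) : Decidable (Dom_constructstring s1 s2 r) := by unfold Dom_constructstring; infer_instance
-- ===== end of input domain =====

-- B replaces A's count-dict build / decrement loop / zero-check by a sort-and-compare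
-- behind the same length guard (alternative decomposition, not faster).


-- ===== PORT A =====
-- first loop: count = {}; for char in r: if char in count: count[char] += 1 else: count[char] = 1
def pvBuildCount (rs : List Char) : PySem.Dict Char Int :=
  rs.foldl (fun d c => if d.contains c then d.insert c (d.getD c 0 + 1) else d.insert c 1) PySem.Dict.empty

-- second loop with the early return "No"; 'none' stands for that early exit
def pvConsume (cs : List Char) (d : PySem.Dict Char Int) : Option (PySem.Dict Char Int) :=
  match cs with
  | [] => some d
  | c :: rest =>
    if d.get? c = none ∨ d.getD c 0 = 0 then none
    else pvConsume rest (d.insert c (d.getD c 0 - 1))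

-- third loop: for value in count.values(): if value != 0: return False; return True
def pvValuesZero (vs : List Int) : Bool :=
  match vs with
  | [] => true
  | v :: rest => if v ≠ 0 then false else pvValuesZero rest

-- Python's "No" (a non-bool return, excluded by Pre_) is rendered as false here.
def constructstring (s1 : String) (s2 : String) (r : String) : Bool :=
  if PySem.Str.len s1 + PySem.Str.len s2 ≠ PySem.Str.len r then false
  else
    let count := pvBuildCount r.toList
    let combined := s1 ++ s2
    match pvConsume combined.toList count with
    | none => false        -- Python: return "No" (outside Pre_)
    | some d => pvValuesZero d.values

-- ===== PORT B =====
def constructstring_alt (s1 : String) (s2 : String) (r : String) : Bool :=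
  if PySem.Str.len s1 + PySem.Str.len s2 ≠ PySem.Str.len r then false
  else PySem.List.sorted (s1 ++ s2).toList (fun x => x) false == PySem.List.sorted r.toList (fun x => x) false

-- ===== PRECONDITION & SPEC =====
-- Pre_ excludes exactly the inputs where s1+s2 and r have equal length but are not anagrams:
-- there Python A returns the string "No", which is not a value of the declared bool type.
def Pre_constructstring (s1 : String) (s2 : String) (r : String) : Prop :=
  PySem.Str.len s1 + PySem.Str.len s2 ≠ PySem.Str.len r ∨ (s1.toList ++ s2.toList).Perm r.toList
instance (s1 : String) (s2 : String) (r : String) : Decidable (Pre_constructstring s1 s2 r) := by unfold Pre_constructstring; infer_instance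

def pvWitness_constructstring : String × String × String := ("ab", "c", "bca")

def Spec_constructstring (s1 : String) (s2 : String) (r : String) (out : Bool) : Prop := out = constructstring_alt s1 s2 r
instance (s1 : String) (s2 : String) (r : String) (out : Bool) : Decidable (Spec_constructstring s1 s2 r out) := by unfold Spec_constructstring; infer_instance

-- ===== CLAIM (what is proved, stated in full; the proofs are below) =====
def Claim_equal_constructstring : Prop := ∀ (s1 : String) (s2 : String) (r : String), Dom_constructstring s1 s2 r → Pre_constructstring s1 s2 r → Spec_constructstring s1 s2 r (constructstring s1 s2 r)

-- ===== LEMMAS AND PROOFS =====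

-- A's branchy counting loop builds exactly PySem.Dict.counter r
theorem pvBuildCount_eq_counter (rs : List Char) : pvBuildCount rs = PySem.Dict.counter rs := by
  have hstep : (fun (d : PySem.Dict Char Int) (c : Char) =>
      if d.contains c then d.insert c (d.getD c 0 + 1) else d.insert c 1)
      = fun d c => d.insert c (d.getD c 0 + 1) := by
    funext d c
    by_cases h : d.contains c
    · simp [h]
    · have : d.getD c 0 = 0 := PySem.Dict.getD_of_not_contains d 0 (by simpa using h)
      simp [h, this]
  rw [pvBuildCount, hstep, PySem.Dict.foldl_insert_getD_add_one_eq_counter]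

-- the decrement loop succeeds and subtracts the consumed counts, keeping the key list
theorem pvConsume_ok (cs : List Char) (d : PySem.Dict Char Int)
    (hnd : d.keys.Nodup) (hle : ∀ c, (cs.count c : Int) ≤ d.getD c 0) :
    ∃ d', pvConsume cs d = some d' ∧ d'.keys = d.keys ∧ d'.keys.Nodup ∧
      ∀ c, d'.getD c 0 = d.getD c 0 - cs.count c := by
  induction cs generalizing d with
  | nil => exact ⟨d, rfl, rfl, hnd, by simp⟩
  | cons c rest ih =>
    have hpos : (1 : Int) ≤ d.getD c 0 := by
      have := hle c
      have hc : (1 : Int) ≤ ((c :: rest).count c : Int) := by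
        simp
      omega
    have hcont : d.contains c = true := by
      by_contra h
      have : d.getD c 0 = 0 := PySem.Dict.getD_of_not_contains d 0 (by
        cases hcc : d.contains c
        · rfl
        · exact absurd hcc h)
      omega
    have hget : d.get? c ≠ none := by
      intro h
      have : d.contains c = false := by
        rw [PySem.Dict.contains_eq_isSome_get?, h]; rfl
      simp [this] at hcont
    have hcond : ¬ (d.get? c = none ∨ d.getD c 0 = 0) := by
      rintro (h | h)
      · exact hget h
      · omega
    set d2 := d.insert c (d.getD c 0 - 1) with hd2
    have hkeys2 : d2.keys = d.keys := PySem.Dict.keys_insert_of_contains d _ hcont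
    have hnd2 : d2.keys.Nodup := hkeys2 ▸ hnd
    have hgetD2 : ∀ c', d2.getD c' 0 = if c' = c then d.getD c 0 - 1 else d.getD c' 0 := by
      intro c'; exact PySem.Dict.getD_insert d c c' (d.getD c 0 - 1) 0
    have hle2 : ∀ c', (rest.count c' : Int) ≤ d2.getD c' 0 := by
      intro c'
      rw [hgetD2]
      by_cases h : c' = c
      · subst h
        have := hle c'
        have : ((c' :: rest).count c' : Int) = (rest.count c' : Int) + 1 := by
          simp
        omega
      · have := hle c'
        have : ((c :: rest).count c' : Int) = (rest.count c' : Int) := by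
          rw [List.count_cons_of_ne (Ne.symm h)]
        rw [if_neg h]
        omega
    obtain ⟨d', h1, h2, h3, h4⟩ := ih d2 hnd2 hle2
    refine ⟨d', ?_, h2.trans hkeys2, h3, ?_⟩
    · rw [pvConsume, if_neg hcond, ← hd2, h1]
    · intro c'
      rw [h4, hgetD2]
      by_cases h : c' = c
      · subst h
        simp
        omega
      · rw [if_neg h]
        have : ((c :: rest).count c' : Int) = (rest.count c' : Int) := by
          rw [List.count_cons_of_ne (Ne.symm h)]
        omega

theorem pvValuesZero_of_all (vs : List Int) (h : ∀ v ∈ vs, v = 0) : pvValuesZero vs = true := by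
  induction vs with
  | nil => rfl
  | cons v rest ih =>
    have hv : v = 0 := h v (by simp)
    rw [pvValuesZero, if_neg (by simpa using hv)]
    exact ih (fun w hw => h w (by simp [hw]))

-- ===== VERDICT (by name: the statement is the Claim_ definition above) =====
theorem constructstring_spec : Claim_equal_constructstring := by
  intro s1 s2 r _ hpre
  unfold Spec_constructstring constructstring constructstring_alt
  by_cases hlen : PySem.Str.len s1 + PySem.Str.len s2 ≠ PySem.Str.len r
  · rw [if_pos hlen, if_pos hlen]
  · rw [if_neg hlen, if_neg hlen]
    have hperm : (s1.toList ++ s2.toList).Perm r.toList := by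
      rcases hpre with h | h
      · exact absurd h hlen
      · exact h
    -- B side is true
    have hb : (PySem.List.sorted (s1 ++ s2).toList (fun x => x) false
        == PySem.List.sorted r.toList (fun x => x) false) = true := by
      rw [beq_iff_eq]
      rw [String.toList_append]
      exact (PySem.List.sorted_id_eq_sorted_id_iff_perm _ _).mpr hperm
    rw [hb]
    -- A side is true
    rw [pvBuildCount_eq_counter]
    show (match pvConsume (s1 ++ s2).toList (PySem.Dict.counter r.toList) with
          | none => false
          | some d => pvValuesZero d.values) = true
    have hcount : ∀ c, (((s1 ++ s2).toList.count c : Int))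
        ≤ (PySem.Dict.counter r.toList).getD c 0 := by
      intro c
      rw [PySem.Dict.getD_counter, String.toList_append, hperm.count_eq]
    obtain ⟨d', h1, _, h3, h4⟩ :=
      pvConsume_ok (s1 ++ s2).toList (PySem.Dict.counter r.toList)
        (PySem.Dict.nodup_keys_counter _) hcount
    rw [h1]
    apply pvValuesZero_of_all
    intro v hv
    rw [PySem.Dict.values_eq_map_keys d' h3 0] at hv
    obtain ⟨k, _, hk⟩ := List.mem_map.mp hv
    have := h4 k
    rw [PySem.Dict.getD_counter, String.toList_append, hperm.count_eq] at this
    omega
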